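-- pv_equiv track=rewrite | github.com/Szelethus/halozat_alg | Robot.py | get_code_halfway_point
-- ===== SOURCE A (Python) =====
-- def get_code_halfway_point(code):
--     depth = 0
--     idx = 0
--     node_count = 1
--
--     while idx < len(code):
--         c = code[idx]
--         idx = idx + 1
--
--         # We finished parsing the structure of the graph.
--         if depth == 0 and c == '0':
--             break;
--         # 0 means "go up in the tree".
--         elif c == '0':
--             depth = depth - 1
--         # 1 means "go down in the tree" (to an unvisited node).
--         else:
--             depth = depth + 1
--             node_count = node_count + 1
--
--     return idx, node_count
-- ===== SOURCE B (Python) =====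
-- def get_code_halfway_point(code):
--     # Explicit stack of per-subtree node counts (iterative recursive-descent):
--     # a '1' opens a child (push a fresh count 1); a '0' closes the current
--     # node, whose count is merged into its parent; closing the root returns.
--     stack = [1]
--     idx = 0
--     n = len(code)
--     while idx < n:
--         c = code[idx]
--         idx += 1
--         if c == '0':
--             sub = stack.pop()
--             if not stack:
--                 return idx, sub
--             stack[-1] += sub
--         else:
--             stack.append(1)
--     total = 0
--     while stack:
--         total += stack.pop()
--     return idx, total
-- ===== Notes on version B (the rewrite author's own statement) =====
-- stated objective: alternative
-- what changed: Replaces A's depth counter with a single running node counter by an explicit stack of per-subtree node counts (an iterative recursive-descent parse): each '1' pushes a fresh count, each '0' pops and merges the closed subtree's count into its parent, returning when the root closes.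
import Mathlib
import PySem

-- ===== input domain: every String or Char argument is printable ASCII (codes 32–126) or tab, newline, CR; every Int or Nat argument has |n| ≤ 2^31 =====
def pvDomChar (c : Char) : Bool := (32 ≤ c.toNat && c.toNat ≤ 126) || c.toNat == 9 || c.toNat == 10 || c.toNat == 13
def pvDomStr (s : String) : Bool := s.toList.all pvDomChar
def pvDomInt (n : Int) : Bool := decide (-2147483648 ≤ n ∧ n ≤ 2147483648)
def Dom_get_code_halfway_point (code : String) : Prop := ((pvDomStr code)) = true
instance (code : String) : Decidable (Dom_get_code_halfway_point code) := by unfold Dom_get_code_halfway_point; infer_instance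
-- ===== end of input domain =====

-- B replaces A's depth counter + single running node counter with an explicit
-- stack of per-subtree node counts merged when a subtree closes (an iterative
-- recursive-descent parse); same O(n) cost, alternative decomposition.

-- ===== PORT A =====
-- A's while loop over idx, consuming the string char by char; state (depth, idx, node_count).
def goA : List Char → Int → Int → Int → Int × Int
  | [], _depth, idx, node_count => (idx, node_count)
  | c :: cs, depth, idx, node_count =>
    if depth = 0 ∧ c = '0' then (idx + 1, node_count)
    else if c = '0' then goA cs (depth - 1) (idx + 1) node_count
    else goA cs (depth + 1) (idx + 1) (node_count + 1)

def get_code_halfway_point (code : String) : Int × Int :=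
  goA code.toList 0 0 1

-- ===== PORT B =====
-- B's while loop; the stack's top is the list head ('pop'/'append'/'stack[-1]' act on the head).
def goB : List Char → Int → List Int → Int × Int
  | [], idx, stack => (idx, stack.foldl (· + ·) 0)  -- the final 'while stack: total += stack.pop()'
  | c :: cs, idx, stack =>
    if c = '0' then
      match stack with
      | [] => (idx + 1, 0)  -- unreachable: the stack is never empty (Python would raise here)
      | sub :: stack' =>
        match stack' with
        | [] => (idx + 1, sub)          -- 'if not stack: return idx, sub'
        | t :: ts => goB cs (idx + 1) ((t + sub) :: ts)  -- 'stack[-1] += sub'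
    else goB cs (idx + 1) (1 :: stack)  -- 'stack.append(1)'

def get_code_halfway_point_alt (code : String) : Int × Int :=
  goB code.toList 0 [1]

-- ===== PRECONDITION & SPEC =====
def Spec_get_code_halfway_point (code : String) (out : Int × Int) : Prop := out = get_code_halfway_point_alt code
instance (code : String) (out : Int × Int) : Decidable (Spec_get_code_halfway_point code out) := by unfold Spec_get_code_halfway_point; infer_instance

-- ===== CLAIM (what is proved, stated in full; the proofs are below) =====
def Claim_equal_get_code_halfway_point : Prop := ∀ (code : String), Dom_get_code_halfway_point code → Spec_get_code_halfway_point code (get_code_halfway_point code)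

-- ===== LEMMAS AND PROOFS =====

lemma foldl_add_shift (l : List Int) (a : Int) :
    l.foldl (· + ·) a = a + l.foldl (· + ·) 0 := by
  induction l generalizing a with
  | nil => simp
  | cons x xs ih => simp [List.foldl, ih (a + x), ih x]; ring

lemma foldl_cons_add (x : Int) (l : List Int) :
    (x :: l).foldl (· + ·) 0 = x + l.foldl (· + ·) 0 := by
  simp only [List.foldl]
  rw [foldl_add_shift]
  ring

-- Invariant: A's depth is the number of open ancestors (stack length - 1) and
-- A's node_count is the sum of the per-subtree counts on B's stack.
lemma goA_eq_goB (cs : List Char) : ∀ (idx s0 : Int) (s' : List Int),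
    goA cs (s'.length : Int) idx ((s0 :: s').foldl (· + ·) 0) = goB cs idx (s0 :: s') := by
  induction cs with
  | nil => intro idx s0 s'; simp [goA, goB]
  | cons c cs ih =>
    intro idx s0 s'
    by_cases h0 : c = '0'
    · cases s' with
      | nil => simp [goA, goB, h0]
      | cons t ts =>
        have hsum : (s0 :: t :: ts).foldl (· + ·) 0 = ((t + s0) :: ts).foldl (· + ·) 0 := by
          simp only [foldl_cons_add]; ring
        simp only [goA, goB, h0]
        rw [if_neg (by simp; omega)]
        simp only [if_true]
        rw [hsum]
        have hlen : ((t :: ts).length : Int) - 1 = (ts.length : Int) := by simp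
        rw [hlen]
        exact ih (idx + 1) (t + s0) ts
    · have hsum : (s0 :: s').foldl (· + ·) 0 + 1 = ((1 :: s0 :: s').foldl (· + ·) 0) := by
        simp only [foldl_cons_add]; ring
      simp only [goA, goB]
      rw [if_neg (fun h => h0 h.2), if_neg h0, if_neg h0]
      rw [hsum]
      have hlen : ((s'.length : Int)) + 1 = (((s0 :: s').length : Int)) := by simp
      rw [hlen]
      exact ih (idx + 1) 1 (s0 :: s')

-- ===== VERDICT (by name: the statement is the Claim_ definition above) =====
theorem get_code_halfway_point_spec : Claim_equal_get_code_halfway_point := by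
  intro code _
  unfold Spec_get_code_halfway_point get_code_halfway_point get_code_halfway_point_alt
  have := goA_eq_goB code.toList 0 1 []
  simpa using this
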